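-- pv_equiv track=rewrite | github.com/RDSoria/music-recommender | test_recommend.py | find_seed
-- ===== SOURCE A (Python) =====
-- from typing import List, Dict, Tuple
--
-- def find_seed(items: List[Dict], needle: str) -> Dict:
--     n = needle.lower().strip()
--     # exact (case-insensitive) match to basename
--     for it in items:
--         if it["name"].lower() == n:
--             return it
--     # fallback: partial substring match
--     for it in items:
--         if n in it["name"].lower():
--             return it
--     raise ValueError(f"Song '{needle}' not found in features.")
-- ===== SOURCE B (Python) =====
-- def find_seed(items, needle):
--     n = needle.lower().strip()
--     fallback = None
--     for it in items:
--         nm = it["name"].lower()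
--         if nm == n:
--             return it
--         if fallback is None and n in nm:
--             fallback = it
--     if fallback is not None:
--         return fallback
--     raise ValueError(f"Song '{needle}' not found in features.")
-- ===== Notes on version B (the rewrite author's own statement) =====
-- stated objective: simpler
-- what changed: Replaces A's two full passes (exact pass, then substring pass) by one pass that returns immediately on an exact match and remembers the first substring match in a fallback variable.
import Mathlib
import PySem

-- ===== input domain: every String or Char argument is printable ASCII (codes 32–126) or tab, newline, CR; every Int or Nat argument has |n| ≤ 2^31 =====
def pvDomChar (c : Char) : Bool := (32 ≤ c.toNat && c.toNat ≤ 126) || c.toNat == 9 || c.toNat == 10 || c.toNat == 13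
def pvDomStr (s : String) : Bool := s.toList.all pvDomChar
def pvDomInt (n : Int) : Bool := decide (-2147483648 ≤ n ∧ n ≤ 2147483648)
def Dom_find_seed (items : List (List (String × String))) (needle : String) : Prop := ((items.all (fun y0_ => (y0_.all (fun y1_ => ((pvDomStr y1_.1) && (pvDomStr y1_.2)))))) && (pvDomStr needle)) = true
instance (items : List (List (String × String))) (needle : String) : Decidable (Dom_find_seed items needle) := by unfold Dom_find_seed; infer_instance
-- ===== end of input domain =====

-- B is a single pass that returns on an exact match and remembers the first substring match; A makes two passes.
-- Both ports are about the RETURN value; A raises (KeyError/ValueError) exactly outside Pre_find_seed.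

-- ===== PORT A =====
-- it["name"] (dict lookup = first match); safe under Pre_, which guarantees the key exists wherever A reads it
def pvName (it : List (String × String)) : String := (it.lookup "name").getD ""

-- first loop of A: exact (case-insensitive) match
def pvLoopExact (items : List (List (String × String))) (n : String) : Option (List (String × String)) :=
  match items with
  | [] => none
  | it :: rest => if PySem.Str.lower (pvName it) = n then some it else pvLoopExact rest n

-- second loop of A: substring match
def pvLoopPartial (items : List (List (String × String))) (n : String) : Option (List (String × String)) :=
  match items with
  | [] => none
  | it :: rest => if PySem.Str.isIn n (PySem.Str.lower (pvName it)) then some it else pvLoopPartial rest n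

def find_seed (items : List (List (String × String))) (needle : String) : List (String × String) :=
  let n := PySem.Str.strip (PySem.Str.lower needle)
  match pvLoopExact items n with
  | some it => it
  | none =>
    match pvLoopPartial items n with
    | some it => it
    | none => []   -- Python raises ValueError here; excluded by Pre_find_seed

-- ===== PORT B =====
-- single loop with a fallback accumulator (Source B)
def pvLoopB (items : List (List (String × String))) (n : String)
    (fb : Option (List (String × String))) : List (String × String) :=
  match items with
  | [] =>
    match fb with
    | some it => it
    | none => []   -- Python raises ValueError here; excluded by Pre_find_seed
  | it :: rest =>
    let nm := PySem.Str.lower (pvName it)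
    if nm = n then it
    else pvLoopB rest n (if fb.isNone && PySem.Str.isIn n nm then some it else fb)

def find_seed_alt (items : List (List (String × String))) (needle : String) : List (String × String) :=
  pvLoopB items (PySem.Str.strip (PySem.Str.lower needle)) none

-- ===== PRECONDITION & SPEC =====
-- Pre_ holds exactly when Python A returns: either an exact match at index k with every item up to k
-- carrying the "name" key (no KeyError before the return), or all items carry "name" and some name
-- contains the needle (the fallback loop returns); otherwise A raises KeyError or ValueError.
def Pre_find_seed (items : List (List (String × String))) (needle : String) : Prop :=
  let n := PySem.Str.strip (PySem.Str.lower needle)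
  (∃ k, k < items.length ∧
      (∀ j, j ≤ k → (items[j]!.lookup "name").isSome = true) ∧
      PySem.Str.lower (pvName items[k]!) = n)
  ∨ ((∀ it ∈ items, (it.lookup "name").isSome = true) ∧
      ∃ it ∈ items, PySem.Str.isIn n (PySem.Str.lower (pvName it)) = true)
instance (items : List (List (String × String))) (needle : String) : Decidable (Pre_find_seed items needle) := by unfold Pre_find_seed; infer_instance

def pvWitness_find_seed : (List (List (String × String))) × String := ([[("name", "Abba")]], " ABBA ")

def Spec_find_seed (items : List (List (String × String))) (needle : String) (out : List (String × String)) : Prop := out = find_seed_alt items needle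
instance (items : List (List (String × String))) (needle : String) (out : List (String × String)) : Decidable (Spec_find_seed items needle out) := by unfold Spec_find_seed; infer_instance

-- ===== CLAIM (what is proved, stated in full; the proofs are below) =====
def Claim_equal_find_seed : Prop := ∀ (items : List (List (String × String))) (needle : String), Dom_find_seed items needle → Pre_find_seed items needle → Spec_find_seed items needle (find_seed items needle)

-- ===== LEMMAS AND PROOFS =====

-- how the two A-side results and the fallback combine
def pvResolve (e fb p : Option (List (String × String))) : List (String × String) :=
  match e with
  | some it => it
  | none => match fb with
    | some f => f
    | none => match p with
      | some it => it
      | none => []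

theorem pvLoopB_eq (items : List (List (String × String))) (n : String) :
    ∀ fb, pvLoopB items n fb = pvResolve (pvLoopExact items n) fb (pvLoopPartial items n) := by
  induction items with
  | nil => intro fb; rfl
  | cons it rest ih =>
    intro fb
    simp only [pvLoopB, pvLoopExact, pvLoopPartial]
    by_cases hx : PySem.Str.lower (pvName it) = n
    · rw [if_pos hx, if_pos hx]; rfl
    · rw [if_neg hx, if_neg hx, ih]
      cases fb with
      | some f =>
        simp only [Option.isNone_some, Bool.false_and, Bool.false_eq_true, if_false]
        cases pvLoopExact rest n <;> rfl
      | none =>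
        simp only [Option.isNone_none, Bool.true_and]
        by_cases hp : PySem.Str.isIn n (PySem.Str.lower (pvName it)) = true
        · rw [if_pos hp, if_pos hp]
          cases pvLoopExact rest n <;> rfl
        · rw [if_neg hp, if_neg hp]

-- ===== VERDICT (by name: the statement is the Claim_ definition above) =====
theorem find_seed_spec : Claim_equal_find_seed := by
  intro items needle _ _
  unfold Spec_find_seed find_seed find_seed_alt
  rw [pvLoopB_eq]
  cases h1 : pvLoopExact items (PySem.Str.strip (PySem.Str.lower needle)) <;>
    cases h2 : pvLoopPartial items (PySem.Str.strip (PySem.Str.lower needle)) <;>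
    simp [pvResolve, h1, h2]
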